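-- pv_equiv track=rewrite | github.com/JustinTime42/stanley | src/architecture/consistency_checker.py | _check_technology_compatibility
-- ===== SOURCE A (Python) =====
-- from typing import List, Dict, Any, Optional
--
-- def _check_technology_compatibility(
--
--     technologies: Dict[str, Any],
-- ) -> List[tuple[str, str]]:
--     """
--     Check technology compatibility.
--
--     Args:
--         technologies: Technology choices
--
--     Returns:
--         List of incompatible technology pairs
--     """
--     incompatible_pairs = []
--
--     tech_names = list(technologies.keys())
--
--     for i, tech1_name in enumerate(tech_names):
--         tech1 = technologies[tech1_name]
--
--         for tech2_name in tech_names[i + 1 :]: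
--             # Check if incompatible
--             incompatible_with = tech1.get("incompatible_with", [])
--
--             if tech2_name in incompatible_with:
--                 incompatible_pairs.append((tech1_name, tech2_name))
--
--     return incompatible_pairs
-- ===== SOURCE B (Python) =====
-- def _check_technology_compatibility(technologies):
--     tech_names = list(technologies.keys())
--     pos = {name: i for i, name in enumerate(tech_names)}
--     incompatible_pairs = []
--     for i, name in enumerate(tech_names):
--         inc = technologies[name].get("incompatible_with", [])
--         later = sorted({c for c in inc if pos.get(c, -1) > i}, key=lambda c: pos[c])
--         incompatible_pairs.extend((name, c) for c in later)
--     return incompatible_pairs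
-- ===== Notes on version B (the rewrite author's own statement) =====
-- stated objective: faster
-- what changed: Instead of scanning every later tech name and testing membership in tech1's incompatible_with list (O(n^2) membership tests, each O(L)), B builds a name-to-position index once and, for each tech, deduplicates its own incompatible_with list, keeps the names with a later position, and sorts them by position.
import Mathlib
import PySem

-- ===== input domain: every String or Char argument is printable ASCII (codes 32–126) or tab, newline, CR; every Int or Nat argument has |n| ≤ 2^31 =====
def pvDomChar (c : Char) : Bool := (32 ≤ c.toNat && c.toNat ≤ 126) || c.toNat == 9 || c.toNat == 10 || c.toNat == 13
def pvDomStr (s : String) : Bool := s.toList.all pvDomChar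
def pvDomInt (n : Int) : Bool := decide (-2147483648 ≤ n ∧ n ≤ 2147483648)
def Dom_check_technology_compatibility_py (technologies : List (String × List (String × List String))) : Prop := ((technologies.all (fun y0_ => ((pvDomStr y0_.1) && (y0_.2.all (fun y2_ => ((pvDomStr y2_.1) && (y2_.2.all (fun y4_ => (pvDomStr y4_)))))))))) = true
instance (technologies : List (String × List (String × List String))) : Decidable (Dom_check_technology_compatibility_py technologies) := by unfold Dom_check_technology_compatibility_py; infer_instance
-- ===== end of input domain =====

-- ===== PORT A =====
-- B changes the inner scan over all later tech names into a scan of each tech's own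
-- incompatible_with list (deduplicated, filtered to later names, sorted by position);
-- objective: faster. (Equivalence of the RETURN value; neither program mutates its argument.)
-- technologies[tech1_name] is rendered with getD []: the key is always a member of keys, so the default is never used.
def check_technology_compatibility_py (technologies : List (String × List (String × List String))) : List (String × String) :=
  let d := PySem.Dict.ofList technologies
  let tech_names := d.keys
  (PySem.List.enumerate tech_names).foldl (fun incompatible_pairs p =>
    let tech1 := d.getD p.2 []
    (PySem.List.slice tech_names (some (p.1 + 1)) none).foldl (fun incompatible_pairs tech2_name =>
      let incompatible_with := (PySem.Dict.ofList tech1).getD "incompatible_with" []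
      if incompatible_with.contains tech2_name then incompatible_pairs ++ [(p.2, tech2_name)]
      else incompatible_pairs) incompatible_pairs) []

-- ===== PORT B =====
-- pos[c] in the sort key is rendered with getD (-1): every sorted element passed the filter, so the default is never used.
def check_technology_compatibility_py_alt (technologies : List (String × List (String × List String))) : List (String × String) :=
  let d := PySem.Dict.ofList technologies
  let tech_names := d.keys
  let pos : PySem.Dict String Int :=
    PySem.Dict.ofList ((PySem.List.enumerate tech_names).map (fun p => (p.2, p.1)))
  (PySem.List.enumerate tech_names).foldl (fun incompatible_pairs p =>
    let inc := (PySem.Dict.ofList (d.getD p.2 [])).getD "incompatible_with" []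
    let later := PySem.List.sorted (PySem.Set.ofList (inc.filter (fun c => pos.getD c (-1) > p.1)))
      (fun c => pos.getD c (-1))
    incompatible_pairs ++ later.map (fun c => (p.2, c))) []

-- ===== PRECONDITION & SPEC =====
def Spec_check_technology_compatibility_py (technologies : List (String × List (String × List String))) (out : List (String × String)) : Prop := out = check_technology_compatibility_py_alt technologies
instance (technologies : List (String × List (String × List String))) (out : List (String × String)) : Decidable (Spec_check_technology_compatibility_py technologies out) := by unfold Spec_check_technology_compatibility_py; infer_instance

-- ===== CLAIM (what is proved, stated in full; the proofs are below) =====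
def Claim_equal_check_technology_compatibility_py : Prop := ∀ (technologies : List (String × List (String × List String))), Dom_check_technology_compatibility_py technologies → Spec_check_technology_compatibility_py technologies (check_technology_compatibility_py technologies)

-- ===== LEMMAS AND PROOFS =====

-- The position dictionary built by B: getD at names[j] is j (names without duplicates).
def pvPos (names : List String) : PySem.Dict String Int :=
  PySem.Dict.ofList ((PySem.List.enumerate names).map (fun p => (p.2, p.1)))

theorem pvPos_items (names : List String) (hnd : names.Nodup) :
    (pvPos names).items = (PySem.List.enumerate names).map (fun p => (p.2, p.1)) := by
  have h := PySem.Dict.items_foldl_insert_fresh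
      ((PySem.List.enumerate names).map (fun p => (p.2, p.1)))
      (fun a => a.1) (fun a => a.2) PySem.Dict.empty
      (by intro a _; exact PySem.Dict.contains_empty _)
      (by simpa [List.map_map, Function.comp_def, PySem.List.map_snd_enumerate] using hnd)
  simpa [pvPos, PySem.Dict.ofList, PySem.Dict.update] using h

theorem pvPos_getD_getElem (names : List String) (hnd : names.Nodup) (j : Nat) (hj : j < names.length) :
    (pvPos names).getD names[j] (-1) = (j : Int) := by
  apply PySem.Dict.getD_of_mem_items
  · rw [pvPos_items names hnd]
    refine List.mem_map.mpr ⟨((j : Int), names[j]), ?_, rfl⟩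
    have hj' : j < (PySem.List.enumerate names 0).length := by
      simpa [PySem.List.length_enumerate] using hj
    have heq := PySem.List.getElem_enumerate names 0 j hj'
    have hmem := List.getElem_mem hj'
    rw [heq] at hmem
    simpa using hmem
  · exact PySem.Dict.nodup_keys_ofList _

theorem pvPos_getD_of_not_mem (names : List String) (hnd : names.Nodup) (c : String) (hc : c ∉ names) :
    (pvPos names).getD c (-1) = -1 := by
  apply PySem.Dict.getD_of_not_contains
  rw [Bool.eq_false_iff]
  intro hcon
  apply hc
  have hmem := (PySem.Dict.contains_iff_mem_keys (pvPos names) c).mp hcon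
  simp only [PySem.Dict.keys, pvPos_items names hnd, List.map_map] at hmem
  simpa [Function.comp_def, PySem.List.map_snd_enumerate] using hmem

-- membership in a later suffix ↔ the position is later (names without duplicates)
theorem pvMem_drop_iff (names : List String) (hnd : names.Nodup) (k : Nat) (c : String) :
    c ∈ names.drop (k + 1) ↔ (pvPos names).getD c (-1) > (k : Int) := by
  constructor
  · intro hmem
    obtain ⟨m, hm, hcm⟩ := List.mem_iff_getElem.mp hmem
    have hlen : k + 1 + m < names.length := by
      have := hm; simp [List.length_drop] at this; omega
    have heq : (List.drop (k + 1) names)[m] = names[k + 1 + m]'hlen := by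
      simp [List.getElem_drop]
    rw [heq] at hcm
    subst hcm
    rw [pvPos_getD_getElem names hnd (k + 1 + m) hlen]
    push_cast; omega
  · intro hgt
    by_cases hcn : c ∈ names
    · obtain ⟨j, hj, hcj⟩ := List.mem_iff_getElem.mp hcn
      subst hcj
      rw [pvPos_getD_getElem names hnd j hj] at hgt
      have hjk : k + 1 ≤ j := by exact_mod_cast Int.add_one_le_iff.mpr hgt
      refine List.mem_iff_getElem.mpr ⟨j - (k + 1), ?_, ?_⟩
      · simp [List.length_drop]; omega
      · simp only [List.getElem_drop]
        congr 1; omega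
    · rw [pvPos_getD_of_not_mem names hnd c hcn] at hgt
      omega

-- names is strictly increasing under pvPos
theorem pvPos_pairwise (names : List String) (hnd : names.Nodup) :
    names.Pairwise (fun a b => (pvPos names).getD a (-1) < (pvPos names).getD b (-1)) := by
  rw [List.pairwise_iff_getElem]
  intro p q hp hq hpq
  rw [pvPos_getD_getElem names hnd p hp, pvPos_getD_getElem names hnd q hq]
  exact_mod_cast hpq

-- the heart: B's sorted-filtered candidate list IS A's filtered suffix
theorem pvLater_eq (names : List String) (hnd : names.Nodup) (k : Nat)
    (inc : List String) :
    PySem.List.sorted (PySem.Set.ofList (inc.filter (fun c => (pvPos names).getD c (-1) > (k : Int))))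
        (fun c => (pvPos names).getD c (-1))
      = (names.drop (k + 1)).filter (fun c => inc.contains c) := by
  apply PySem.List.sorted_eq_of_perm_of_pairwise_lt
  · rw [List.perm_ext_iff_of_nodup]
    · intro c
      rw [List.mem_filter, pvMem_drop_iff names hnd k c, PySem.Set.mem_ofList, List.mem_filter]
      simp only [List.contains_iff_mem, decide_eq_true_eq]
      tauto
    · exact ((List.filter_sublist).trans (List.drop_sublist _ _)).nodup hnd
    · exact PySem.Set.nodup_ofList _
  · exact List.Pairwise.sublist ((List.filter_sublist).trans (List.drop_sublist _ _)) (pvPos_pairwise names hnd)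

-- ===== VERDICT (by name: the statement is the Claim_ definition above) =====
theorem check_technology_compatibility_py_spec : Claim_equal_check_technology_compatibility_py := by
  intro technologies _
  unfold Spec_check_technology_compatibility_py
  unfold check_technology_compatibility_py check_technology_compatibility_py_alt
  apply Eq.symm
  apply PySem.List.foldl_congr_mem
  intro acc p hp
  have hnd : ((PySem.Dict.ofList technologies).keys).Nodup := PySem.Dict.nodup_keys_ofList _
  obtain ⟨j, hj, hpj⟩ := List.mem_iff_getElem.mp hp
  rw [PySem.List.getElem_enumerate] at hpj
  subst hpj
  have hj' : j < ((PySem.Dict.ofList technologies).keys).length := by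
    simpa [PySem.List.length_enumerate] using hj
  simp only [zero_add]
  have hpos : PySem.Dict.ofList ((PySem.List.enumerate ((PySem.Dict.ofList technologies).keys)).map (fun p => (p.2, p.1)))
      = pvPos ((PySem.Dict.ofList technologies).keys) := rfl
  rw [hpos, pvLater_eq ((PySem.Dict.ofList technologies).keys) hnd j
      ((PySem.Dict.ofList (((PySem.Dict.ofList technologies).getD (((PySem.Dict.ofList technologies).keys)[j]'hj') []))).getD "incompatible_with" [])]
  rw [PySem.List.slice_from _ (by positivity : (0:Int) ≤ (j:Int) + 1)]
  have ht : ((j : Int) + 1).toNat = j + 1 := by omega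
  rw [ht, PySem.List.foldl_append_if]
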